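-- pv_equiv track=rewrite | github.com/xi-lef/adventofcode | 23/13.py | is_reflecting
-- ===== SOURCE A (Python) =====
-- def calc_diff(a, b):
--     return sum(x != y for x, y in zip(a, b))
--
-- def is_reflecting(pattern, smudges):
--     for i in range(len(pattern) - 1):
--         diff = 0
--         for j in range(min(i + 1, len(pattern) - i - 1)):
--             diff += calc_diff(pattern[i - j], pattern[i + j + 1])
--             if diff > 1:
--                 break
--         else:
--             if diff == smudges:
--                 return i + 1
--     return 0
-- ===== SOURCE B (Python) =====
-- # B: one bucket pass over unordered row pairs instead of A's per-fold mirror walk.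
-- # Every pair (i, j) with odd i + j is a mirrored pair of exactly one fold line
-- # (i + j + 1) // 2, so a single sweep over all pairs accumulates every fold's
-- # mismatch total at once; the answer is the first fold whose total equals smudges.
-- # Targets other than 0 or 1 are rejected up front: A's inner loop stops once the
-- # running diff exceeds 1, so no such target can ever match.
-- def is_reflecting(pattern, smudges):
--     if smudges != 0 and smudges != 1:
--         return 0
--     n = len(pattern)
--     totals = [0] * n
--     for i in range(n):
--         for j in range(i + 1, n):
--             if (i + j) % 2 == 1:
--                 totals[(i + j + 1) // 2] += sum(x != y for x, y in zip(pattern[i], pattern[j]))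
--     for k in range(1, n):
--         if totals[k] == smudges:
--             return k
--     return 0
-- ===== Notes on version B (the rewrite author's own statement) =====
-- stated objective: alternative
-- what changed: B replaces A's per-fold mirror walk (running diff with break and for-else) by a single bucket pass over unordered row pairs: each pair (i,j) with odd i+j feeds exactly the fold (i+j+1)//2, so one sweep accumulates all folds' mismatch totals at once and the first fold whose total equals smudges is returned; targets outside {0,1} are rejected up front since A's >1 cap makes them unmatchable.
import Mathlib
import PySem

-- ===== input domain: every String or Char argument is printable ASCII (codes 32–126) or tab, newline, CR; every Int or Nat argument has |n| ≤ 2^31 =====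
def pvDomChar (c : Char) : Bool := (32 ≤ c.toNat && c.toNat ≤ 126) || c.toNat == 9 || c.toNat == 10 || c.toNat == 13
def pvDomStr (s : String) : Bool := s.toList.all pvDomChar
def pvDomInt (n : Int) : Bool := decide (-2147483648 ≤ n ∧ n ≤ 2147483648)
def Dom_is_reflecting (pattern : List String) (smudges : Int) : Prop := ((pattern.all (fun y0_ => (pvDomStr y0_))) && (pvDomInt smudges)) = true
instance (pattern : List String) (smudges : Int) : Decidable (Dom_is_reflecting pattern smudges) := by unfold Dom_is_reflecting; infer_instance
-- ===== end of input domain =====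

-- B replaces A's per-fold mirror walk by a single bucket pass over unordered row
-- pairs (each pair with odd index sum feeds exactly one fold) followed by a scan
-- of the bucket totals; same return value on every input (objective: alternative).

-- ===== PORT A =====
-- sum(x != y for x, y in zip(a, b))  (Source B inlines the same generator sum)
def calc_diff (a b : String) : Int :=
  ((a.toList.zip b.toList).map (fun p => if p.1 ≠ p.2 then (1 : Int) else 0)).sum

-- the inner 'for j' loop with its for-else: 'none' = the 'break' was taken.
-- pyGetD with default "": on A's calls the indices are always in range.
def innerA (pattern : List String) (i : Int) : List Int → Int → Option Int
  | [], diff => some diff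
  | j :: js, diff =>
    let diff' := diff + calc_diff (PySem.List.pyGetD pattern (i - j) "")
                                  (PySem.List.pyGetD pattern (i + j + 1) "")
    if diff' > 1 then none else innerA pattern i js diff'

def outerA (pattern : List String) (smudges : Int) : List Int → Int
  | [] => 0
  | i :: is =>
    match innerA pattern i
        (PySem.List.pyRange 0 (min (i + 1) ((pattern.length : Int) - i - 1)) 1) 0 with
    | some diff => if diff = smudges then i + 1 else outerA pattern smudges is
    | none => outerA pattern smudges is

def is_reflecting (pattern : List String) (smudges : Int) : Int :=
  outerA pattern smudges (PySem.List.pyRange 0 ((pattern.length : Int) - 1) 1)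

-- ===== PORT B =====
-- totals[(i+j+1)//2] += sum(x != y for x, y in zip(pattern[i], pattern[j])) when (i+j)%2 == 1;
-- the bucket index is always in [1, len-1] at the call sites, so .toNat is exact there.
def bucketAdd (pattern : List String) (totals : List Int) (i j : Int) : List Int :=
  if PySem.Int.mod (i + j) 2 = 1 then
    totals.modify (PySem.Int.floordiv (i + j + 1) 2).toNat
      (· + calc_diff (PySem.List.pyGetD pattern i "") (PySem.List.pyGetD pattern j ""))
  else totals

-- the final 'for k in range(1, n)' scan
def scanB (totals : List Int) (smudges : Int) : List Int → Int
  | [] => 0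
  | k :: ks => if PySem.List.pyGetD totals k 0 = smudges then k else scanB totals smudges ks

def is_reflecting_alt (pattern : List String) (smudges : Int) : Int :=
  if smudges ≠ 0 ∧ smudges ≠ 1 then 0
  else
    let n : Int := (pattern.length : Int)
    let totals :=
      (PySem.List.pyRange 0 n 1).foldl
        (fun acc i =>
          (PySem.List.pyRange (i + 1) n 1).foldl
            (fun acc2 j => bucketAdd pattern acc2 i j) acc)
        (List.replicate pattern.length 0)
    scanB totals smudges (PySem.List.pyRange 1 n 1)

-- ===== PRECONDITION & SPEC =====
def Spec_is_reflecting (pattern : List String) (smudges : Int) (out : Int) : Prop := out = is_reflecting_alt pattern smudges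
instance (pattern : List String) (smudges : Int) (out : Int) : Decidable (Spec_is_reflecting pattern smudges out) := by unfold Spec_is_reflecting; infer_instance

-- ===== CLAIM (what is proved, stated in full; the proofs are below) =====
def Claim_equal_is_reflecting : Prop := ∀ (pattern : List String) (smudges : Int), Dom_is_reflecting pattern smudges → Spec_is_reflecting pattern smudges (is_reflecting pattern smudges)

-- ===== LEMMAS AND PROOFS =====

-- mismatch count of the pair of rows i and j (Nat indices, in-range at every use)
def rdiff (pattern : List String) (i j : Nat) : Int :=
  calc_diff (pattern.getD i "") (pattern.getD j "")

-- the mirror-mismatch total at the fold after k rows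
def mSumIdx (pattern : List String) (k : Nat) : Int :=
  ((List.range (min k (pattern.length - k))).map
    (fun t => rdiff pattern (k - 1 - t) (k + t))).sum

theorem calc_diff_nonneg (a b : String) : 0 ≤ calc_diff a b := by
  apply List.sum_nonneg
  intro x hx
  simp only [List.mem_map] at hx
  obtain ⟨p, _, rfl⟩ := hx
  split <;> omega

theorem mSumIdx_nonneg (pattern : List String) (k : Nat) : 0 ≤ mSumIdx pattern k := by
  apply List.sum_nonneg
  intro x hx
  simp only [List.mem_map] at hx
  obtain ⟨p, _, rfl⟩ := hx
  exact calc_diff_nonneg _ _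

-- ---------- A side ----------

-- innerA generalised to an explicit pair list
def innerA' : List (String × String) → Int → Option Int
  | [], diff => some diff
  | (a, b) :: rest, diff =>
    let diff' := diff + calc_diff a b
    if diff' > 1 then none else innerA' rest diff'

theorem innerA_eq_innerA' (pattern : List String) (i : Int) (js : List Int) (d : Int) :
    innerA pattern i js d =
      innerA' (js.map (fun j => (PySem.List.pyGetD pattern (i - j) "",
                                 PySem.List.pyGetD pattern (i + j + 1) ""))) d := by
  induction js generalizing d with
  | nil => rfl
  | cons j js ih => simp only [innerA, innerA', List.map_cons]; split <;> simp [ih]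

theorem pairSum_nonneg (ps : List (String × String)) :
    0 ≤ (ps.map (fun p => calc_diff p.1 p.2)).sum := by
  apply List.sum_nonneg
  intro x hx
  simp only [List.mem_map] at hx
  obtain ⟨p, _, rfl⟩ := hx
  exact calc_diff_nonneg p.1 p.2

theorem innerA'_closed (ps : List (String × String)) (d : Int) (hd : d ≤ 1) :
    innerA' ps d =
      if d + (ps.map (fun p => calc_diff p.1 p.2)).sum ≤ 1
      then some (d + (ps.map (fun p => calc_diff p.1 p.2)).sum) else none := by
  induction ps generalizing d with
  | nil => simp [innerA']; omega
  | cons p rest ih =>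
    obtain ⟨a, b⟩ := p
    have hrest := pairSum_nonneg rest
    have hab := calc_diff_nonneg a b
    simp only [innerA', List.map_cons, List.sum_cons]
    by_cases h : d + calc_diff a b > 1
    · have hno : ¬ (d + (calc_diff a b + (rest.map (fun p => calc_diff p.1 p.2)).sum) ≤ 1) := by omega
      simp [h, hno]
    · rw [if_neg (by omega)]
      rw [ih (d + calc_diff a b) (by omega)]
      rw [add_assoc]

-- A's inner pair list at candidate i = a is the t-indexed mirror list of fold a+1
theorem pairsA_eq (pattern : List String) (a : Nat) (ha : a + 1 < pattern.length) :
    ((PySem.List.pyRange 0 (min ((a : Int) + 1) ((pattern.length : Int) - (a : Int) - 1)) 1).map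
      (fun j => (PySem.List.pyGetD pattern ((a : Int) - j) "",
                 PySem.List.pyGetD pattern ((a : Int) + j + 1) ""))) =
    (List.range (min (a + 1) (pattern.length - (a + 1)))).map
      (fun t => (pattern.getD (a + 1 - 1 - t) "", pattern.getD (a + 1 + t) "")) := by
  have hm : (min ((a : Int) + 1) ((pattern.length : Int) - (a : Int) - 1) - 0).toNat
      = min (a + 1) (pattern.length - (a + 1)) := by omega
  rw [PySem.List.pyRange_one, List.map_map, hm]
  apply List.map_congr_left
  intro t ht
  simp only [List.mem_range] at ht
  have ht1 : t ≤ a := by omega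
  have h1 : (0 : Int) + (t : Int) = ((t : Nat) : Int) := by omega
  have h2 : (a : Int) - ((t : Nat) : Int) = ((a - t : Nat) : Int) := by omega
  have h3 : (a : Int) + ((t : Nat) : Int) + 1 = ((a + t + 1 : Nat) : Int) := by push_cast; ring
  simp only [Function.comp_apply, h1, h2, h3, PySem.List.pyGetD_natCast]
  have h4 : a + 1 - 1 - t = a - t := by omega
  have h5 : a + 1 + t = a + t + 1 := by omega
  rw [h4, h5]

-- per-candidate decision, A side
theorem acceptA_iff (pattern : List String) (smudges : Int) (a : Nat)
    (ha : a + 1 < pattern.length) :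
    ((∃ d, innerA pattern (a : Int)
        (PySem.List.pyRange 0 (min ((a : Int) + 1) ((pattern.length : Int) - (a : Int) - 1)) 1) 0
        = some d ∧ d = smudges)
      ↔ mSumIdx pattern (a + 1) = smudges ∧ smudges ≤ 1) := by
  rw [innerA_eq_innerA', pairsA_eq pattern a ha, innerA'_closed _ 0 (by omega)]
  have hrw : (((List.range (min (a + 1) (pattern.length - (a + 1)))).map
      (fun t => (pattern.getD (a + 1 - 1 - t) "", pattern.getD (a + 1 + t) ""))).map
      (fun p => calc_diff p.1 p.2)).sum = mSumIdx pattern (a + 1) := by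
    unfold mSumIdx rdiff
    rw [List.map_map]
    rfl
  rw [hrw]
  have hn := mSumIdx_nonneg pattern (a + 1)
  by_cases hc : (0 : Int) + mSumIdx pattern (a + 1) ≤ 1
  · rw [if_pos hc]
    constructor
    · rintro ⟨d, hd, rfl⟩
      simp only [Option.some.injEq] at hd
      omega
    · rintro ⟨h, _⟩; exact ⟨_, rfl, by omega⟩
  · rw [if_neg hc]
    constructor
    · rintro ⟨d, hd, _⟩; cases hd
    · rintro ⟨h, hsl⟩; omega

-- ---------- B side: the bucket pass ----------

-- Nat-level step: what one pair (i, j) does to the bucket list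
def stepN (pattern : List String) (acc : List Int) (p : Nat × Nat) : List Int :=
  if (p.1 + p.2) % 2 = 1 then
    acc.modify ((p.1 + p.2 + 1) / 2) (· + rdiff pattern p.1 p.2)
  else acc

-- the flat list of pairs the two nested loops visit
def flatPairs (L : Nat) : List (Nat × Nat) :=
  (List.range L).flatMap (fun i => (List.range (L - (i + 1))).map (fun t => (i, i + 1 + t)))

theorem foldl_foldl_flat {α β γ : Type} (l : List α) (g : α → List β)
    (f : γ → β → γ) (init : γ) :
    l.foldl (fun acc i => (g i).foldl f acc) init = (l.flatMap g).foldl f init := by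
  induction l generalizing init with
  | nil => rfl
  | cons x xs ih => simp only [List.foldl_cons, List.flatMap_cons, List.foldl_append, ih]

theorem bucketAdd_natCast (pattern : List String) (acc : List Int) (a b : Nat) :
    bucketAdd pattern acc (a : Int) (b : Int) = stepN pattern acc (a, b) := by
  unfold bucketAdd stepN rdiff
  dsimp only
  have h1 : (a : Int) + (b : Int) = ((a + b : Nat) : Int) := by push_cast; ring
  have h2 : ((a + b : Nat) : Int) + 1 = ((a + b + 1 : Nat) : Int) := by push_cast; ring
  have hm : PySem.Int.mod ((a + b : Nat) : Int) 2 = (((a + b) % 2 : Nat) : Int) := by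
    exact_mod_cast PySem.Int.mod_natCast (a + b) 2
  have hfd : PySem.Int.floordiv ((a + b + 1 : Nat) : Int) 2 = (((a + b + 1) / 2 : Nat) : Int) := by
    exact_mod_cast PySem.Int.floordiv_natCast (a + b + 1) 2
  rw [h1, h2, hm, hfd]
  simp only [PySem.List.pyGetD_natCast, Int.toNat_natCast]
  by_cases h : (a + b) % 2 = 1
  · rw [if_pos (by exact_mod_cast h), if_pos h]
  · rw [if_neg (fun hh => h (by exact_mod_cast hh)), if_neg h]

-- the whole nested Int fold, in Nat form
theorem fold_to_nat (pattern : List String) (init : List Int) :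
    (PySem.List.pyRange 0 ((pattern.length : Int)) 1).foldl
      (fun acc i =>
        (PySem.List.pyRange (i + 1) ((pattern.length : Int)) 1).foldl
          (fun acc2 j => bucketAdd pattern acc2 i j) acc)
      init
    = (flatPairs pattern.length).foldl (stepN pattern) init := by
  rw [PySem.List.pyRange_one]
  have h0 : (((pattern.length : Int)) - 0).toNat = pattern.length := by omega
  rw [h0, List.foldl_map]
  unfold flatPairs
  rw [← foldl_foldl_flat]
  apply PySem.List.foldl_congr_mem
  intro acc a ha
  simp only [List.mem_range] at ha
  have h1 : (0 : Int) + (a : Int) = (a : Int) := by ring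
  rw [h1, PySem.List.pyRange_one]
  have h2 : (((pattern.length : Int)) - ((a : Int) + 1)).toNat = pattern.length - (a + 1) := by omega
  rw [h2, List.foldl_map, List.foldl_map]
  apply PySem.List.foldl_congr_mem
  intro acc2 t _
  have h3 : (a : Int) + 1 + (t : Nat) = ((a + 1 + t : Nat) : Int) := by push_cast; ring
  rw [h3, bucketAdd_natCast]

theorem stepN_length (pattern : List String) (acc : List Int) (p : Nat × Nat) :
    (stepN pattern acc p).length = acc.length := by
  unfold stepN
  split <;> simp

-- the bucket list after a fold of steps, entrywise
theorem getD_foldl_stepN (pattern : List String) (P : List (Nat × Nat)) (acc : List Int) (k : Nat)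
    (h : ∀ p ∈ P, (p.1 + p.2 + 1) / 2 < acc.length) :
    (P.foldl (stepN pattern) acc).getD k 0
      = acc.getD k 0 + (P.map (fun p =>
          if (p.1 + p.2) % 2 = 1 ∧ (p.1 + p.2 + 1) / 2 = k
          then rdiff pattern p.1 p.2 else 0)).sum := by
  induction P generalizing acc with
  | nil => simp
  | cons p ps ih =>
    have hp := h p (by simp)
    rw [List.foldl_cons, ih _ (fun q hq => by rw [stepN_length]; exact h q (by simp [hq])),
        List.map_cons, List.sum_cons]
    have hstep : (stepN pattern acc p).getD k 0
        = acc.getD k 0 + (if (p.1 + p.2) % 2 = 1 ∧ (p.1 + p.2 + 1) / 2 = k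
            then rdiff pattern p.1 p.2 else 0) := by
      unfold stepN
      by_cases hodd : (p.1 + p.2) % 2 = 1
      · rw [if_pos hodd]
        by_cases hk : (p.1 + p.2 + 1) / 2 = k
        · subst hk
          rw [if_pos ⟨hodd, rfl⟩, List.getD_eq_getElem?_getD, List.getD_eq_getElem?_getD,
              List.getElem?_modify, List.getElem?_eq_getElem hp]
          simp
        · rw [if_neg (fun hh => hk hh.2), List.getD_eq_getElem?_getD,
              List.getD_eq_getElem?_getD, List.getElem?_modify]
          simp [hk]
      · rw [if_neg hodd, if_neg (fun hh => hodd hh.1)]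
        simp
    rw [hstep]
    ring

theorem mem_flatPairs {L : Nat} {p : Nat × Nat} (hp : p ∈ flatPairs L) :
    p.1 < p.2 ∧ p.2 < L := by
  unfold flatPairs at hp
  simp only [List.mem_flatMap, List.mem_map, List.mem_range] at hp
  obtain ⟨i, hi, t, ht, rfl⟩ := hp
  constructor <;> simp <;> omega

theorem sum_map_flatMap {α β : Type} (l : List α) (g : α → List β) (f : β → Int) :
    ((l.flatMap g).map f).sum = (l.map (fun i => ((g i).map f).sum)).sum := by
  induction l with
  | nil => rfl
  | cons x xs ih => simp [List.flatMap_cons, List.map_append, List.sum_append, ih]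

theorem sum_map_range_eq_finset (n : Nat) (f : Nat → Int) :
    ((List.range n).map f).sum = ∑ i ∈ Finset.range n, f i := by
  induction n with
  | zero => rfl
  | succ m ih => rw [List.range_succ, List.map_append, List.sum_append,
      Finset.sum_range_succ, ih]; simp

-- inner sum of the bucket pass, for one i, closed form
theorem inner_bucket_sum (pattern : List String) (L i k : Nat) :
    (((List.range (L - (i + 1))).map (fun t => (i, i + 1 + t))).map (fun p =>
        if (p.1 + p.2) % 2 = 1 ∧ (p.1 + p.2 + 1) / 2 = k
        then rdiff pattern p.1 p.2 else 0)).sum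
      = if i + 1 ≤ k ∧ 2 * k < L + i + 1 then rdiff pattern i (2 * k - 1 - i) else 0 := by
  rw [List.map_map, sum_map_range_eq_finset]
  by_cases hik : i + 1 ≤ k
  · have hcanon : ∑ t ∈ Finset.range (L - (i + 1)),
        ((fun p => if (p.1 + p.2) % 2 = 1 ∧ (p.1 + p.2 + 1) / 2 = k
          then rdiff pattern p.1 p.2 else 0) ∘ (fun t => (i, i + 1 + t))) t
        = ∑ t ∈ Finset.range (L - (i + 1)),
            (if t = 2 * (k - (i + 1)) then rdiff pattern i (i + 1 + t) else 0) := by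
      apply Finset.sum_congr rfl
      intro t _
      dsimp only [Function.comp_apply]
      split_ifs with h1 h2 h2 <;> first | rfl | (exfalso; omega)
    rw [hcanon, Finset.sum_ite_eq' (Finset.range (L - (i + 1)))]
    simp only [Finset.mem_range]
    by_cases hlt : 2 * (k - (i + 1)) < L - (i + 1)
    · rw [if_pos hlt, if_pos (by omega)]
      congr 1
      omega
    · rw [if_neg hlt, if_neg (by omega)]
  · rw [if_neg (by omega)]
    apply Finset.sum_eq_zero
    intro t _
    dsimp only [Function.comp_apply]
    rw [if_neg (by omega)]

-- total bucket k content = the mirror-mismatch total of fold k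
theorem bucket_eq_mSumIdx (pattern : List String) (k : Nat)
    (hk1 : 1 ≤ k) (hk2 : k < pattern.length) :
    ((flatPairs pattern.length).map (fun p =>
        if (p.1 + p.2) % 2 = 1 ∧ (p.1 + p.2 + 1) / 2 = k
        then rdiff pattern p.1 p.2 else 0)).sum = mSumIdx pattern k := by
  set L := pattern.length with hL
  unfold flatPairs
  rw [sum_map_flatMap, sum_map_range_eq_finset]
  have hstep1 : ∀ i ∈ Finset.range L,
      (((List.range (L - (i + 1))).map (fun t => (i, i + 1 + t))).map (fun p =>
        if (p.1 + p.2) % 2 = 1 ∧ (p.1 + p.2 + 1) / 2 = k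
        then rdiff pattern p.1 p.2 else 0)).sum
      = if i + 1 ≤ k ∧ 2 * k < L + i + 1 then rdiff pattern i (2 * k - 1 - i) else 0 :=
    fun i _ => inner_bucket_sum pattern L i k
  rw [Finset.sum_congr rfl hstep1]
  have hsub1 : Finset.range k ⊆ Finset.range L := by
    intro x hx
    simp only [Finset.mem_range] at *
    omega
  have hzero1 : ∀ i ∈ Finset.range L, i ∉ Finset.range k →
      (if i + 1 ≤ k ∧ 2 * k < L + i + 1 then rdiff pattern i (2 * k - 1 - i) else 0) = 0 := by
    intro i _ hi
    simp only [Finset.mem_range, not_lt] at hi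
    rw [if_neg (by omega)]
  rw [← Finset.sum_subset hsub1 hzero1]
  have hcong2 : ∀ i ∈ Finset.range k,
      (if i + 1 ≤ k ∧ 2 * k < L + i + 1 then rdiff pattern i (2 * k - 1 - i) else 0)
      = (fun i => if 2 * k < L + i + 1 then rdiff pattern i (2 * k - 1 - i) else 0) i := by
    intro i hi
    simp only [Finset.mem_range] at hi
    dsimp only
    by_cases h : 2 * k < L + i + 1
    · rw [if_pos ⟨by omega, h⟩, if_pos h]
    · rw [if_neg (by omega), if_neg h]
  rw [Finset.sum_congr rfl hcong2, ← Finset.sum_range_reflect]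
  unfold mSumIdx
  rw [sum_map_range_eq_finset]
  have hsub2 : Finset.range (min k (L - k)) ⊆ Finset.range k := by
    intro x hx
    simp only [Finset.mem_range] at *
    exact Nat.lt_of_lt_of_le hx (Nat.min_le_left _ _)
  have hzero2 : ∀ t ∈ Finset.range k, t ∉ Finset.range (min k (L - k)) →
      (fun t => if 2 * k < L + (k - 1 - t) + 1
        then rdiff pattern (k - 1 - t) (2 * k - 1 - (k - 1 - t)) else 0) t = 0 := by
    intro t ht hnt
    simp only [Finset.mem_range, not_lt] at ht hnt
    dsimp only
    rcases Nat.le_total k (L - k) with hc | hc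
    · rw [Nat.min_eq_left hc] at hnt
      omega
    · rw [Nat.min_eq_right hc] at hnt
      rw [if_neg (by omega)]
  rw [← Finset.sum_subset hsub2 hzero2]
  apply Finset.sum_congr rfl
  intro t ht
  simp only [Finset.mem_range] at ht
  have ht1 : t < k := Nat.lt_of_lt_of_le ht (Nat.min_le_left _ _)
  have ht2 : t < L - k := Nat.lt_of_lt_of_le ht (Nat.min_le_right _ _)
  rw [if_pos (by omega)]
  congr 1
  omega

-- the totals list B builds, queried at k
theorem totals_getD (pattern : List String) (k : Nat) (hk1 : 1 ≤ k) (hk2 : k < pattern.length) :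
    ((PySem.List.pyRange 0 ((pattern.length : Int)) 1).foldl
      (fun acc i =>
        (PySem.List.pyRange (i + 1) ((pattern.length : Int)) 1).foldl
          (fun acc2 j => bucketAdd pattern acc2 i j) acc)
      (List.replicate pattern.length 0)).getD k 0 = mSumIdx pattern k := by
  rw [fold_to_nat, getD_foldl_stepN pattern _ _ k
      (fun p hp => by
        have := mem_flatPairs hp
        rw [List.length_replicate]
        omega)]
  rw [bucket_eq_mSumIdx pattern k hk1 hk2]
  simp

-- ---------- joining the two scans ----------

theorem outer_eq (pattern : List String) (smudges : Int) (totals : List Int)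
    (hs : 0 ≤ smudges ∧ smudges ≤ 1)
    (htot : ∀ k : Nat, 1 ≤ k → k < pattern.length →
        PySem.List.pyGetD totals (k : Int) 0 = mSumIdx pattern k)
    (lst : List Int)
    (hmem : ∀ i ∈ lst, ∃ a : Nat, i = (a : Int) ∧ a + 1 < pattern.length) :
    outerA pattern smudges lst = scanB totals smudges (lst.map (· + 1)) := by
  induction lst with
  | nil => rfl
  | cons i is ih =>
    obtain ⟨a, rfl, ha⟩ := hmem i (by simp)
    have hA := acceptA_iff pattern smudges a ha
    have hB : PySem.List.pyGetD totals ((a : Int) + 1) 0 = mSumIdx pattern (a + 1) := by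
      have h1 : (a : Int) + 1 = ((a + 1 : Nat) : Int) := by push_cast; ring
      rw [h1]
      exact htot (a + 1) (by omega) (by omega)
    simp only [outerA, scanB, List.map_cons]
    cases hcase : innerA pattern (a : Int)
        (PySem.List.pyRange 0 (min ((a : Int) + 1) ((pattern.length : Int) - (a : Int) - 1)) 1) 0 with
    | none =>
      dsimp only
      rw [hcase] at hA
      have hno : ¬ (mSumIdx pattern (a + 1) = smudges ∧ smudges ≤ 1) := by
        rw [← hA]; rintro ⟨d, hd, _⟩; cases hd
      have hm : mSumIdx pattern (a + 1) ≠ smudges := fun h => hno ⟨h, hs.2⟩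
      rw [if_neg (by rw [hB]; exact hm)]
      exact ih (fun i hi => hmem i (by simp [hi]))
    | some d =>
      dsimp only
      rw [hcase] at hA
      by_cases hd : d = smudges
      · have hm : mSumIdx pattern (a + 1) = smudges := (hA.mp ⟨d, rfl, hd⟩).1
        rw [if_pos hd, if_pos (by rw [hB]; exact hm)]
      · have hm : mSumIdx pattern (a + 1) ≠ smudges := by
          intro h
          obtain ⟨d', hd', hds⟩ := hA.mpr ⟨h, hs.2⟩
          simp only [Option.some.injEq] at hd'
          exact hd (hd' ▸ hds)
        rw [if_neg hd, if_neg (by rw [hB]; exact hm)]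
        exact ih (fun i hi => hmem i (by simp [hi]))

-- when smudges ∉ {0,1}, A's loop never returns a candidate
theorem outerA_zero (pattern : List String) (smudges : Int)
    (hs : ¬ (smudges = 0 ∨ smudges = 1)) (lst : List Int)
    (hmem : ∀ i ∈ lst, ∃ a : Nat, i = (a : Int) ∧ a + 1 < pattern.length) :
    outerA pattern smudges lst = 0 := by
  induction lst with
  | nil => rfl
  | cons i is ih =>
    obtain ⟨a, rfl, ha⟩ := hmem i (by simp)
    have hA := acceptA_iff pattern smudges a ha
    simp only [outerA]
    cases hcase : innerA pattern (a : Int)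
        (PySem.List.pyRange 0 (min ((a : Int) + 1) ((pattern.length : Int) - (a : Int) - 1)) 1) 0 with
    | none => exact ih (fun i hi => hmem i (by simp [hi]))
    | some d =>
      dsimp only
      rw [hcase] at hA
      have hd : d ≠ smudges := by
        intro h
        have := hA.mp ⟨d, rfl, h⟩
        have hnn := mSumIdx_nonneg pattern (a + 1)
        omega
      rw [if_neg hd]
      exact ih (fun i hi => hmem i (by simp [hi]))

theorem range_mem (pattern : List String) (i : Int)
    (h : i ∈ PySem.List.pyRange 0 ((pattern.length : Int) - 1) 1) :
    ∃ a : Nat, i = (a : Int) ∧ a + 1 < pattern.length := by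
  rw [PySem.List.mem_pyRange_one] at h
  refine ⟨i.toNat, by omega, by omega⟩

theorem range_map (n : Int) :
    PySem.List.pyRange 1 n 1 = (PySem.List.pyRange 0 (n - 1) 1).map (· + 1) := by
  rw [PySem.List.pyRange_one, PySem.List.pyRange_one, List.map_map]
  have h : (n - 1 - 0) = (n - 1) := by ring
  rw [h]
  apply List.map_congr_left
  intro x _
  simp
  ring

-- ===== VERDICT (by name: the statement is the Claim_ definition above) =====
theorem is_reflecting_spec : Claim_equal_is_reflecting := by
  intro pattern smudges _
  unfold Spec_is_reflecting is_reflecting is_reflecting_alt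
  by_cases hs : smudges = 0 ∨ smudges = 1
  · rw [if_neg (by omega)]
    dsimp only
    rw [range_map]
    apply outer_eq pattern smudges _ (by omega)
    · intro k hk1 hk2
      rw [PySem.List.pyGetD_natCast]
      exact totals_getD pattern k hk1 hk2
    · exact range_mem pattern
  · rw [if_pos (by omega)]
    exact outerA_zero pattern smudges hs _ (range_mem pattern)
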